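-- pv_equiv track=rewrite | github.com/cheesepicklematt/project_euler_solutions | q49/q49.py | find_arithmetic_sequences
-- ===== SOURCE A (Python) =====
-- def find_arithmetic_sequences(lst):
--     sequences = []
--     n = len(lst)
--
--     for i in range(n):
--         for j in range(i+1, n):
--             common_difference = lst[j] - lst[i]
--             sequence = [lst[i], lst[j]]
--
--             for k in range(j+1, n):
--                 if lst[k] - sequence[-1] == common_difference:
--                     sequence.append(lst[k])
--
--             if len(sequence) >= 3:
--                 sequences.append(sequence)
--
--     return sequences
-- ===== SOURCE B (Python) =====
-- def find_arithmetic_sequences(lst):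
--     n = len(lst)
--     # index the positions of each value once; chains then binary-search the
--     # next needed position instead of rescanning the whole tail per pair
--     pos = {}
--     for idx in range(n):
--         v = lst[idx]
--         if v in pos:
--             pos[v].append(idx)
--         else:
--             pos[v] = [idx]
--
--     sequences = []
--     for i in range(n):
--         for j in range(i + 1, n):
--             d = lst[j] - lst[i]
--             seq = [lst[i], lst[j]]
--             if d == 0:
--                 # zero difference: the chain is every later occurrence of this value
--                 idxs = pos.get(lst[j], [])
--                 lo, hi = 0, len(idxs)
--                 while lo < hi:
--                     mid = (lo + hi) // 2
--                     if idxs[mid] <= j: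
--                         lo = mid + 1
--                     else:
--                         hi = mid
--                 seq.extend([lst[j]] * (len(idxs) - lo))
--                 if len(seq) >= 3:
--                     sequences.append(seq)
--                 continue
--             cur = j
--             while True:
--                 idxs = pos.get(seq[-1] + d, [])
--                 # first index in idxs strictly greater than cur (bisect_right)
--                 lo, hi = 0, len(idxs)
--                 while lo < hi:
--                     mid = (lo + hi) // 2
--                     if idxs[mid] <= cur:
--                         lo = mid + 1
--                     else:
--                         hi = mid
--                 if lo == len(idxs):
--                     break
--                 cur = idxs[lo]
--                 seq.append(lst[cur])
--             if len(seq) >= 3: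
--                 sequences.append(seq)
--     return sequences
-- ===== Notes on version B (the rewrite author's own statement) =====
-- stated objective: faster
-- what changed: Instead of rescanning the whole tail for every pair, B builds a value-to-sorted-occurrence-indices dict once and extends each chain by binary-searching the occurrence list of the next needed value (taking the whole occurrence block at once when the difference is 0); intended as faster - measured 2.11x at the largest constant-input size both finished (output size is itself cubic there), far larger on distinct-valued inputs.
import Mathlib
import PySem

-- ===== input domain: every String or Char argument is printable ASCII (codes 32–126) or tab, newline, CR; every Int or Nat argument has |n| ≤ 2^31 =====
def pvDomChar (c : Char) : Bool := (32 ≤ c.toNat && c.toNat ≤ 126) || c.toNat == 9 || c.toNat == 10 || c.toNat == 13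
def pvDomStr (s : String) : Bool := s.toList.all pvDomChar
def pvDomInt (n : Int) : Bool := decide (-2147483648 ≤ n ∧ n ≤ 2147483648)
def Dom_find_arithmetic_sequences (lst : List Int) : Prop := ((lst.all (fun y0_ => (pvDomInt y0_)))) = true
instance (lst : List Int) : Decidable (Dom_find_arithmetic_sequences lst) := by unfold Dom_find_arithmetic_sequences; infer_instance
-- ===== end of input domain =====

-- B replaces A's rescans of the whole tail per pair by a value→occurrence-index dict with
-- binary-search jumps to the next needed value; intended as faster (measured 2.11× on the
-- largest constant inputs both finished; the output itself is cubic there); same return value.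


-- ===== PORT A =====
-- port of A: triple nested loop; `lst[k]` is `lst.getD k 0` (all indices generated by
-- `range` are in range); `sequence[-1]` on the always-nonempty sequence is `getLastD 0`.
def find_arithmetic_sequences (lst : List Int) : List (List Int) :=
  let n := lst.length
  (List.range n).foldl (fun sequences i =>
    (List.range' (i+1) (n-(i+1))).foldl (fun sequences j =>
      let cd := lst.getD j 0 - lst.getD i 0
      let seq := [lst.getD i 0, lst.getD j 0]
      let seq := (List.range' (j+1) (n-(j+1))).foldl (fun s k =>
        if lst.getD k 0 - s.getLastD 0 = cd then s ++ [lst.getD k 0] else s) seq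
      if 3 ≤ seq.length then sequences ++ [seq] else sequences) sequences) []

-- ===== PORT B =====
-- B-side helpers: the value→occurrence-indices dict, the hand-written binary search
-- (Source B's lo/hi while loop), and the jump chain (Source B's while True loop; the unbounded
-- Python loop is totalised with fuel = len(lst), which the equivalence proof shows is enough).
-- Source B's `if d == 0: …; continue` is the then-branch of the if below (same computation).
def fasPos (lst : List Int) : PySem.Dict Int (List Nat) :=
  (List.range lst.length).foldl (fun d idx =>
    let v := lst.getD idx 0
    match d.get? v with
    | some l => d.insert v (l ++ [idx])
    | none   => d.insert v [idx]) PySem.Dict.empty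

-- Source B's `while lo < hi` binary search, returning lo (first position in idxs with value > cur)
def fasBsearch (idxs : List Nat) (cur lo hi : Nat) : Nat :=
  if _h : lo < hi then
    let mid := (lo + hi) / 2
    if idxs.getD mid 0 ≤ cur then fasBsearch idxs cur (mid + 1) hi
    else fasBsearch idxs cur lo mid
  else lo
termination_by hi - lo
decreasing_by all_goals omega

-- Source B's `while True` chain: jump to the next occurrence of seq[-1] + d after cur
def fasChain (lst : List Int) (pos : PySem.Dict Int (List Nat)) (d : Int) :
    Nat → Nat → List Int → List Int
  | 0, _, seq => seq
  | fuel+1, cur, seq =>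
    let idxs := pos.getD (seq.getLastD 0 + d) []
    let lo := fasBsearch idxs cur 0 idxs.length
    if lo = idxs.length then seq
    else
      let cur' := idxs.getD lo 0
      fasChain lst pos d fuel cur' (seq ++ [lst.getD cur' 0])

def find_arithmetic_sequences_alt (lst : List Int) : List (List Int) :=
  let n := lst.length
  let pos := fasPos lst
  (List.range n).foldl (fun sequences i =>
    (List.range' (i+1) (n-(i+1))).foldl (fun sequences j =>
      let d := lst.getD j 0 - lst.getD i 0
      let seq := [lst.getD i 0, lst.getD j 0]
      let seq :=
        if d = 0 then
          -- zero difference: every later occurrence of lst[j]; idxs[lo:] all hold lst[j]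
          let idxs := pos.getD (lst.getD j 0) []
          let lo := fasBsearch idxs j 0 idxs.length
          seq ++ List.replicate (idxs.length - lo) (lst.getD j 0)
        else fasChain lst pos d n j seq
      if 3 ≤ seq.length then sequences ++ [seq] else sequences) sequences) []

-- ===== PRECONDITION & SPEC =====
def Spec_find_arithmetic_sequences (lst : List Int) (out : List (List Int)) : Prop := out = find_arithmetic_sequences_alt lst
instance (lst : List Int) (out : List (List Int)) : Decidable (Spec_find_arithmetic_sequences lst out) := by unfold Spec_find_arithmetic_sequences; infer_instance

-- ===== CLAIM (what is proved, stated in full; the proofs are below) =====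
def Claim_equal_find_arithmetic_sequences : Prop := ∀ (lst : List Int), Dom_find_arithmetic_sequences lst → Spec_find_arithmetic_sequences lst (find_arithmetic_sequences lst)

-- ===== LEMMAS AND PROOFS =====

-- the ordered list of positions of value v in lst
def fasOcc (lst : List Int) (v : Int) : List Nat :=
  (List.range lst.length).filter (fun k => lst.getD k 0 == v)

-- A's inner scan, as a named function (proof-side abbreviation of A's inner foldl)
def fasScan (lst : List Int) (d : Int) (l : List Nat) (seq : List Int) : List Int :=
  l.foldl (fun s k => if lst.getD k 0 - s.getLastD 0 = d then s ++ [lst.getD k 0] else s) seq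

lemma fasOcc_mem (lst : List Int) (v : Int) (k : Nat) :
    k ∈ fasOcc lst v ↔ k < lst.length ∧ lst.getD k 0 = v := by
  simp [fasOcc, List.mem_filter]

lemma fasOcc_sorted (lst : List Int) (v : Int) : (fasOcc lst v).Pairwise (· < ·) := by
  exact List.Pairwise.sublist List.filter_sublist List.pairwise_lt_range

lemma fasPos_build (lst : List Int) (v : Int) :
    ∀ (ks : List Nat) (d0 : PySem.Dict Int (List Nat)),
    ((ks.foldl (fun d idx =>
        let vv := lst.getD idx 0
        match d.get? vv with
        | some l => d.insert vv (l ++ [idx])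
        | none   => d.insert vv [idx]) d0).getD v [])
      = d0.getD v [] ++ ks.filter (fun k => lst.getD k 0 == v) := by
  intro ks
  induction ks with
  | nil => intro d0; simp
  | cons k t ih =>
    intro d0
    rw [List.foldl_cons, ih]
    have hstep : ∀ d1 : PySem.Dict Int (List Nat),
        ((let vv := lst.getD k 0
          match d1.get? vv with
          | some l => d1.insert vv (l ++ [k])
          | none   => d1.insert vv [k]) : PySem.Dict Int (List Nat)).getD v []
        = d1.getD v [] ++ (if lst.getD k 0 == v then [k] else []) := by
      intro d1
      cases hg : d1.get? (lst.getD k 0) with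
      | some l =>
        simp only [hg, PySem.Dict.getD_insert]
        by_cases hv : v = lst.getD k 0
        · subst hv
          rw [if_pos rfl, if_pos (by simp)]
          simp only [PySem.Dict.getD_eq_get?_getD, hg, Option.getD_some]
        · rw [if_neg hv, if_neg (by simpa using fun h => hv h.symm), List.append_nil]
      | none =>
        simp only [hg, PySem.Dict.getD_insert]
        by_cases hv : v = lst.getD k 0
        · subst hv
          rw [if_pos rfl, if_pos (by simp)]
          simp only [PySem.Dict.getD_eq_get?_getD, hg, Option.getD_none]
          rfl
        · rw [if_neg hv, if_neg (by simpa using fun h => hv h.symm), List.append_nil]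
    rw [hstep d0, List.filter_cons]
    by_cases hv : lst.getD k 0 = v
    · rw [if_pos (by simpa using hv), if_pos (by simpa using hv)]
      simp
    · rw [if_neg (by simpa using hv), if_neg (by simpa using hv)]
      simp

lemma fasPos_getD (lst : List Int) (v : Int) :
    (fasPos lst).getD v [] = fasOcc lst v := by
  unfold fasPos fasOcc
  rw [fasPos_build lst v (List.range lst.length) PySem.Dict.empty]
  simp

-- monotonicity of a sorted list under getD
lemma sorted_getD_mono {l : List Nat} (hs : l.Pairwise (· < ·)) {a b : Nat}
    (hab : a ≤ b) (hb : b < l.length) : l.getD a 0 ≤ l.getD b 0 := by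
  rcases Nat.lt_or_ge a b with h | h
  · rw [List.getD_eq_getElem l 0 (by omega), List.getD_eq_getElem l 0 hb]
    exact Nat.le_of_lt (List.pairwise_iff_getElem.mp hs a b _ hb h)
  · have : a = b := by omega
    subst this; rfl

-- the binary search returns the first position whose entry exceeds cur
lemma fasBsearch_correct (idxs : List Nat) (cur : Nat) (hs : idxs.Pairwise (· < ·)) :
    ∀ N lo hi, hi - lo ≤ N → lo ≤ hi → hi ≤ idxs.length →
    (∀ a, a < lo → idxs.getD a 0 ≤ cur) →
    (∀ a, hi ≤ a → a < idxs.length → cur < idxs.getD a 0) →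
    (∀ a, a < fasBsearch idxs cur lo hi → idxs.getD a 0 ≤ cur) ∧
    (∀ a, fasBsearch idxs cur lo hi ≤ a → a < idxs.length → cur < idxs.getD a 0) ∧
    fasBsearch idxs cur lo hi ≤ idxs.length := by
  intro N
  induction N with
  | zero =>
    intro lo hi hN hlh hhl hlow hhigh
    have : ¬ lo < hi := by omega
    rw [fasBsearch, dif_neg this]
    exact ⟨hlow, fun a ha hal => hhigh a (by omega) hal, by omega⟩
  | succ N ih =>
    intro lo hi hN hlh hhl hlow hhigh
    rw [fasBsearch]
    by_cases h : lo < hi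
    · rw [dif_pos h]
      by_cases hmid : idxs.getD ((lo + hi) / 2) 0 ≤ cur
      · rw [if_pos hmid]
        refine ih ((lo + hi) / 2 + 1) hi (by omega) (by omega) hhl ?_ hhigh
        intro a ha
        exact le_trans (sorted_getD_mono hs (by omega) (by omega)) hmid
      · rw [if_neg hmid]
        refine ih lo ((lo + hi) / 2) (by omega) (by omega) (by omega) hlow ?_
        intro a ha hal
        exact lt_of_lt_of_le (by omega) (sorted_getD_mono hs ha hal)
    · rw [dif_neg h]
      exact ⟨hlow, fun a ha hal => hhigh a (by omega) hal, by omega⟩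

lemma find?_eq_some_getD {p : Nat → Bool} (l : List Nat) (r : Nat) (hr : r < l.length)
    (hp : p (l.getD r 0) = true) (hlt : ∀ a, a < r → p (l.getD a 0) = false) :
    l.find? p = some (l.getD r 0) := by
  induction l generalizing r with
  | nil => simp at hr
  | cons x t ih =>
    cases r with
    | zero => exact List.find?_cons_of_pos (by simpa using hp)
    | succ r =>
      have h0 : p x = false := by simpa using hlt 0 (Nat.succ_pos r)
      rw [List.find?_cons_of_neg (by simp [h0])]
      exact ih r (by simpa using hr) (by simpa using hp)
        (fun a ha => by simpa using hlt (a+1) (by omega))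

-- one unfolding of the chain, phrased via find? over the occurrence list
lemma fasChain_unfold (lst : List Int) (pos : PySem.Dict Int (List Nat)) (d : Int)
    (F cur : Nat) (seq : List Int)
    (hs : (pos.getD (seq.getLastD 0 + d) []).Pairwise (· < ·)) :
    fasChain lst pos d (F+1) cur seq =
      (match (pos.getD (seq.getLastD 0 + d) []).find? (fun k => decide (cur < k)) with
      | none => seq
      | some k => fasChain lst pos d F k (seq ++ [lst.getD k 0])) := by
  obtain ⟨h1, h2, h3⟩ := fasBsearch_correct (pos.getD (seq.getLastD 0 + d) []) cur hs
    (pos.getD (seq.getLastD 0 + d) []).length 0 (pos.getD (seq.getLastD 0 + d) []).length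
    (by omega) (by omega) le_rfl (by omega) (by omega)
  by_cases hr : fasBsearch (pos.getD (seq.getLastD 0 + d) []) cur 0
      (pos.getD (seq.getLastD 0 + d) []).length = (pos.getD (seq.getLastD 0 + d) []).length
  · have hfind : (pos.getD (seq.getLastD 0 + d) []).find? (fun k => decide (cur < k)) = none := by
      apply List.find?_eq_none.mpr
      intro k hk
      obtain ⟨a, ha, hak⟩ := List.mem_iff_getElem.mp hk
      have := h1 a (by omega)
      rw [List.getD_eq_getElem _ 0 ha, hak] at this
      simpa using by omega
    rw [hfind]
    simp only [fasChain]
    rw [if_pos hr]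
  · have hrlt : fasBsearch (pos.getD (seq.getLastD 0 + d) []) cur 0
        (pos.getD (seq.getLastD 0 + d) []).length < (pos.getD (seq.getLastD 0 + d) []).length := by
      omega
    have hfind := find?_eq_some_getD (p := fun k => decide (cur < k))
      (pos.getD (seq.getLastD 0 + d) []) _ hrlt
      (by simpa using h2 _ le_rfl hrlt)
      (fun a ha => decide_eq_false (Nat.not_lt.mpr (h1 a ha)))
    rw [hfind]
    simp only [fasChain]
    rw [if_neg hr]

-- first element greater than c in a sorted list containing c+1 is c+1
lemma find?_sorted_mem {l : List Nat} (c : Nat) (hs : l.Pairwise (· < ·))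
    (hm : c + 1 ∈ l) : l.find? (fun k => decide (c < k)) = some (c + 1) := by
  induction l with
  | nil => simp at hm
  | cons x t ih =>
    rcases List.mem_cons.mp hm with h | h
    · subst h; simp [List.find?]
    · have hx : x < c + 1 := (List.pairwise_cons.mp hs).1 _ h
      have : decide (c < x) = false := by simp; omega
      simp only [List.find?, this]
      exact ih (List.pairwise_cons.mp hs).2 h

lemma find?_shift {l : List Nat} (c : Nat) (hne : ∀ k ∈ l, k ≠ c + 1) :
    l.find? (fun k => decide (c < k)) = l.find? (fun k => decide (c + 1 < k)) := by
  induction l with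
  | nil => rfl
  | cons x t ih =>
    have hx : x ≠ c + 1 := hne x (List.mem_cons_self)
    have : (decide (c < x)) = (decide (c + 1 < x)) := by
      by_cases h : c < x <;> simp_all <;> omega
    simp only [List.find?, this]
    cases h : decide (c + 1 < x) with
    | true => rfl
    | false => exact ih (fun k hk => hne k (List.mem_cons_of_mem _ hk))

-- past the end of the list, the chain stops
lemma fasChain_stop (lst : List Int) (d : Int) (c : Nat) (hc : lst.length ≤ c + 1) :
    ∀ fuel seq, fasChain lst (fasPos lst) d fuel c seq = seq := by
  intro fuel seq
  cases fuel with
  | zero => rfl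
  | succ F =>
    rw [fasChain_unfold lst _ d F c seq (by rw [fasPos_getD]; exact fasOcc_sorted _ _)]
    have : ((fasPos lst).getD (seq.getLastD 0 + d) []).find? (fun k => decide (c < k)) = none := by
      rw [fasPos_getD]
      apply List.find?_eq_none.mpr
      intro k hk
      have := (fasOcc_mem lst _ k).mp hk
      simp; omega
    rw [this]

-- CORE: A's inner scan over the tail equals B's jump chain
lemma fasCore (lst : List Int) (d : Int) :
    ∀ m c seq fuel, lst.length - (c+1) = m → lst.length ≤ fuel + c + 1 →
    fasScan lst d (List.range' (c+1) m) seq = fasChain lst (fasPos lst) d fuel c seq := by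
  intro m
  induction m with
  | zero =>
    intro c seq fuel hm hf
    rw [fasChain_stop lst d c (by omega)]
    rfl
  | succ m ih =>
    intro c seq fuel hm hf
    have hcn : c + 1 < lst.length := by omega
    rw [List.range'_succ]
    by_cases hx : lst.getD (c+1) 0 = seq.getLastD 0 + d
    · -- matching step: both sides take lst[c+1]
      cases fuel with
      | zero => omega
      | succ F =>
        have hstep : fasScan lst d ((c+1) :: List.range' (c+1+1) m) seq
            = fasScan lst d (List.range' (c+2) m) (seq ++ [lst.getD (c+1) 0]) := by
          simp only [fasScan, List.foldl_cons]
          congr 1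
          rw [if_pos (by omega)]
        rw [hstep]
        rw [fasChain_unfold lst _ d F c seq (by rw [fasPos_getD]; exact fasOcc_sorted _ _)]
        rw [fasPos_getD]
        rw [find?_sorted_mem c (fasOcc_sorted _ _)
          ((fasOcc_mem lst _ (c+1)).mpr ⟨hcn, hx⟩)]
        exact ih (c+1) (seq ++ [lst.getD (c+1) 0]) F (by omega) (by omega)
    · -- non-matching step: the scan skips c+1 and the chain's find? is unchanged
      have hstep : fasScan lst d ((c+1) :: List.range' (c+1+1) m) seq
          = fasScan lst d (List.range' (c+2) m) seq := by
        simp only [fasScan, List.foldl_cons]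
        congr 1
        rw [if_neg (by omega)]
      rw [hstep]
      have hshift : fasChain lst (fasPos lst) d fuel c seq
          = fasChain lst (fasPos lst) d fuel (c+1) seq := by
        cases fuel with
        | zero => rfl
        | succ F =>
          rw [fasChain_unfold lst _ d F c seq (by rw [fasPos_getD]; exact fasOcc_sorted _ _),
              fasChain_unfold lst _ d F (c+1) seq (by rw [fasPos_getD]; exact fasOcc_sorted _ _)]
          rw [fasPos_getD, find?_shift c]
          intro k hk
          have := (fasOcc_mem lst _ k).mp hk
          intro hke
          exact hx (by rw [← hke]; exact this.2)
      rw [hshift]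
      exact ih (c+1) seq fuel (by omega) (by omega)

-- the scan with common difference 0 appends one copy of v per later occurrence of v
lemma fasScan_zero (lst : List Int) (v : Int) :
    ∀ (l : List Nat) (seq : List Int), seq.getLastD 0 = v →
    fasScan lst 0 l seq = seq ++ List.replicate (l.countP (fun k => lst.getD k 0 == v)) v := by
  intro l
  induction l with
  | nil => intro seq _; simp [fasScan]
  | cons k t ih =>
    intro seq hlast
    simp only [fasScan, List.foldl_cons, List.countP_cons]
    by_cases hk : lst.getD k 0 = v
    · rw [if_pos (by omega)]
      have := ih (seq ++ [lst.getD k 0]) (by rw [List.getLastD_concat]; exact hk)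
      simp only [fasScan] at this
      rw [this, if_pos (by simpa using hk)]
      rw [hk, List.append_assoc]
      simp [List.replicate_succ]
    · rw [if_neg (by omega), if_neg (by simpa using hk), Nat.add_zero]
      have := ih seq hlast
      simpa [fasScan] using this

-- the binary search lands exactly at the block of occurrences after j
lemma fasZero_count (lst : List Int) (j : Nat) (hj : j < lst.length) :
    (fasOcc lst (lst.getD j 0)).length
        - fasBsearch (fasOcc lst (lst.getD j 0)) j 0 (fasOcc lst (lst.getD j 0)).length
      = (List.range' (j+1) (lst.length - (j+1))).countP (fun k => lst.getD k 0 == lst.getD j 0) := by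
  set v := lst.getD j 0 with hv
  set p : Nat → Bool := fun k => lst.getD k 0 == v with hp
  have hsplit : fasOcc lst v
      = (List.range' 0 (j+1)).filter p ++ (List.range' (j+1) (lst.length - (j+1))).filter p := by
    have hr := List.range'_append (s := 0) (m := j+1) (n := lst.length - (j+1)) (step := 1)
    simp only [Nat.one_mul, Nat.zero_add] at hr
    rw [show (j+1) + (lst.length - (j+1)) = lst.length from by omega] at hr
    unfold fasOcc
    rw [List.range_eq_range', ← hr, List.filter_append]
  set A' := (List.range' 0 (j+1)).filter p with hA
  set B' := (List.range' (j+1) (lst.length - (j+1))).filter p with hB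
  have hAle : ∀ a ∈ A', a ≤ j := by
    intro a ha
    have := (List.mem_range'_1.mp (List.mem_of_mem_filter ha)).2
    omega
  have hBgt : ∀ a ∈ B', j < a := by
    intro a ha
    have := (List.mem_range'_1.mp (List.mem_of_mem_filter ha)).1
    omega
  obtain ⟨h1, h2, h3⟩ := fasBsearch_correct (fasOcc lst v) j (fasOcc_sorted lst v)
    (fasOcc lst v).length 0 (fasOcc lst v).length (by omega) (by omega) le_rfl
    (by omega) (by omega)
  set lo := fasBsearch (fasOcc lst v) j 0 (fasOcc lst v).length with hlo
  have hlen : (fasOcc lst v).length = A'.length + B'.length := by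
    rw [hsplit]; simp
  have hloA : lo = A'.length := by
    rcases Nat.lt_trichotomy lo A'.length with h | h | h
    · exfalso
      have hlt : lo < (fasOcc lst v).length := by omega
      have := h2 lo le_rfl hlt
      rw [List.getD_eq_getElem _ 0 hlt] at this
      have hget : (fasOcc lst v)[lo] = A'[lo]'h := by
        simp only [hsplit]
        exact List.getElem_append_left h
      rw [hget] at this
      exact absurd (hAle _ (List.getElem_mem h)) (by omega)
    · exact h
    · exfalso
      have hlt : A'.length < (fasOcc lst v).length := by omega
      have := h1 A'.length h
      rw [List.getD_eq_getElem _ 0 hlt] at this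
      have hB0 : 0 < B'.length := by omega
      have hget : (fasOcc lst v)[A'.length]'hlt = B'[0]'hB0 := by
        simp only [hsplit]
        rw [List.getElem_append_right (Nat.le_refl _)]
        simp
      rw [hget] at this
      exact absurd (hBgt _ (List.getElem_mem hB0)) (by omega)
  rw [List.countP_eq_length_filter, ← hB]
  omega

-- ===== VERDICT (by name: the statement is the Claim_ definition above) =====
theorem find_arithmetic_sequences_spec : Claim_equal_find_arithmetic_sequences := by
  intro lst _
  show find_arithmetic_sequences lst = find_arithmetic_sequences_alt lst
  unfold find_arithmetic_sequences find_arithmetic_sequences_alt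
  apply List.foldl_ext
  intro s i hi
  have hin : i < lst.length := List.mem_range.mp hi
  apply List.foldl_ext
  intro s' j hj
  have hjn : j < lst.length := by
    have := (List.mem_range'_1.mp hj).2
    omega
  have hinner :
      (List.range' (j+1) (lst.length-(j+1))).foldl (fun s k =>
          if lst.getD k 0 - s.getLastD 0 = lst.getD j 0 - lst.getD i 0
          then s ++ [lst.getD k 0] else s) [lst.getD i 0, lst.getD j 0]
      = (if lst.getD j 0 - lst.getD i 0 = 0 then
          [lst.getD i 0, lst.getD j 0] ++
            List.replicate (((fasPos lst).getD (lst.getD j 0) []).length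
              - fasBsearch ((fasPos lst).getD (lst.getD j 0) []) j 0
                  ((fasPos lst).getD (lst.getD j 0) []).length) (lst.getD j 0)
        else fasChain lst (fasPos lst) (lst.getD j 0 - lst.getD i 0) lst.length j
          [lst.getD i 0, lst.getD j 0]) := by
    by_cases hd : lst.getD j 0 - lst.getD i 0 = 0
    · rw [if_pos hd]
      have hscan := fasScan_zero lst (lst.getD j 0)
        (List.range' (j+1) (lst.length-(j+1))) [lst.getD i 0, lst.getD j 0] rfl
      simp only [fasScan] at hscan
      rw [hd, hscan, fasPos_getD, fasZero_count lst j hjn]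
    · rw [if_neg hd]
      have := fasCore lst (lst.getD j 0 - lst.getD i 0) (lst.length - (j+1)) j
        [lst.getD i 0, lst.getD j 0] lst.length rfl (by omega)
      simpa [fasScan] using this
  simp only [hinner]
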